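-- pv_equiv track=rewrite | github.com/lannt-xyz/character-wiki | wiki_remaster.py | _group_char_segments
-- ===== SOURCE A (Python) =====
-- def _group_char_segments(
--     chapter_nums: list[int], segment_size: int, gap_threshold: int
-- ) -> list[tuple[int, int]]:
--     """Group mention chapter numbers into (segment_start, segment_end) tuples.
--
--     Step 1: Split into independent groups when consecutive gap > gap_threshold.
--     Step 2: Within each group, create windows of segment_size chapter range.
--     The (start, end) are actual chapter numbers used in DB range queries.
--     """
--     if not chapter_nums:
--         return []
--     sorted_nums = sorted(set(chapter_nums))
--
--     # Step 1: split by gap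
--     groups: list[list[int]] = []
--     current: list[int] = [sorted_nums[0]]
--     for num in sorted_nums[1:]:
--         if num - current[-1] > gap_threshold:
--             groups.append(current)
--             current = [num]
--         else:
--             current.append(num)
--     groups.append(current)
--
--     # Step 2: split each group into segment_size chapter-range windows
--     segments: list[tuple[int, int]] = []
--     for group in groups:
--         window_start = group[0]
--         while True:
--             window_end = window_start + segment_size - 1
--             in_window = [n for n in group if window_start <= n <= window_end]
--             if not in_window:
--                 break
--             segments.append((in_window[0], in_window[-1]))
--             remaining = [n for n in group if n > window_end]
--             if not remaining:
--                 break
--             window_start = remaining[0]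
--
--     return segments
-- ===== SOURCE B (Python) =====
-- def _group_char_segments(
--     chapter_nums: list[int], segment_size: int, gap_threshold: int
-- ) -> list[tuple[int, int]]:
--     """Single linear pass over the sorted distinct chapters: close the current
--     segment whenever the next chapter jumps by more than gap_threshold or falls
--     outside the segment_size window opened at the segment's first chapter."""
--     if not chapter_nums or segment_size <= 0:
--         return []
--     nums = sorted(set(chapter_nums))
--     segments: list[tuple[int, int]] = []
--     append = segments.append
--     first = prev = nums[0]
--     for x in nums[1:]:
--         if x - prev > gap_threshold or x > first + segment_size - 1:
--             append((first, prev))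
--             first = x
--         prev = x
--     append((first, prev))
--     return segments
-- ===== Notes on version B (the rewrite author's own statement) =====
-- stated objective: faster
-- what changed: Replaces A's two-phase gap-grouping plus per-group window loop that re-filters the whole group for every window with a single linear pass over the sorted distinct chapters that closes a segment when the gap or window bound is exceeded.
import Mathlib
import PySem

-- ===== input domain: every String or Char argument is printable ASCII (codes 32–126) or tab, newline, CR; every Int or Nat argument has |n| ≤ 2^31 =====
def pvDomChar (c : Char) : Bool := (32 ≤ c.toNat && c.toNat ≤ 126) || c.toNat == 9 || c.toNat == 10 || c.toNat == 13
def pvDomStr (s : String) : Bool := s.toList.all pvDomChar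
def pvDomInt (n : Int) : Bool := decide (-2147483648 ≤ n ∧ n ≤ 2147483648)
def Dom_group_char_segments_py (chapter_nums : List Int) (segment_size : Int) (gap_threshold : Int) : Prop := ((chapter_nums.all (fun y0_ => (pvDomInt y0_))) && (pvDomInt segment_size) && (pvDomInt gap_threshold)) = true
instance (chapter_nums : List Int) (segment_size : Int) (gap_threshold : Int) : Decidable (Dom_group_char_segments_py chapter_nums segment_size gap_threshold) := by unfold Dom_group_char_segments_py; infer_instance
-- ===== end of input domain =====

-- B replaces A's two-phase grouping + per-window re-filtering with one linear pass over the
-- sorted distinct chapters (objective: faster).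


-- ===== PORT A =====
-- A's inner 'while True' window loop over one group; fuel = group.length + 1 always suffices
-- (each continuing iteration the 'remaining' suffix is strictly shorter).
def pvWinLoopA (S : Int) (group : List Int) : Int → Nat → List (Int × Int)
  | _, 0 => []
  | ws, Nat.succ fuel =>
    let we := ws + S - 1
    let in_window := group.filter (fun n => decide (ws ≤ n ∧ n ≤ we))
    match in_window with
    | [] => []
    | a :: rest =>
      let seg : Int × Int := (a, (a :: rest).getLast (List.cons_ne_nil a rest))
      let remaining := group.filter (fun n => decide (we < n))
      match remaining with
      | [] => [seg]
      | r :: _ => seg :: pvWinLoopA S group r fuel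

-- body of A's step-1 'for num in sorted_nums[1:]' loop (state: (groups, current))
def pvAstep (G : Int) (st : List (List Int) × List Int) (num : Int) : List (List Int) × List Int :=
  if num - (st.2.getLast?.getD 0) > G then (st.1 ++ [st.2], [num]) else (st.1, st.2 ++ [num])

-- body of A's step-2 'for group in groups' loop
def pvAouter (S : Int) (segments : List (Int × Int)) (g : List Int) : List (Int × Int) :=
  segments ++ pvWinLoopA S g (g.head?.getD 0) (g.length + 1)

def group_char_segments_py (chapter_nums : List Int) (segment_size : Int) (gap_threshold : Int) : List (Int × Int) :=
  if chapter_nums = [] then []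
  else
    let sorted_nums := PySem.List.sorted (PySem.Set.ofList chapter_nums) (fun x => x) false
    let st := (PySem.List.slice sorted_nums (some 1) none).foldl (pvAstep gap_threshold)
      ([], [PySem.List.pyGetD sorted_nums 0 0])
    let groups := st.1 ++ [st.2]
    groups.foldl (pvAouter segment_size) []

-- ===== PORT B =====
-- body of B's single 'for x in nums[1:]' pass (state: (first, prev, segments))
def pvBstep (S G : Int) (st : Int × Int × List (Int × Int)) (x : Int) : Int × Int × List (Int × Int) :=
  if x - st.2.1 > G ∨ x > st.1 + S - 1 then (x, x, st.2.2 ++ [(st.1, st.2.1)])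
  else (st.1, x, st.2.2)

def group_char_segments_py_alt (chapter_nums : List Int) (segment_size : Int) (gap_threshold : Int) : List (Int × Int) :=
  if chapter_nums = [] ∨ segment_size ≤ 0 then []
  else
    let nums := PySem.List.sorted (PySem.Set.ofList chapter_nums) (fun x => x) false
    let h := PySem.List.pyGetD nums 0 0
    let st := (PySem.List.slice nums (some 1) none).foldl
      (pvBstep segment_size gap_threshold) (h, h, [])
    st.2.2 ++ [(st.1, st.2.1)]

-- ===== PRECONDITION & SPEC =====
def Spec_group_char_segments_py (chapter_nums : List Int) (segment_size : Int) (gap_threshold : Int) (out : List (Int × Int)) : Prop := out = group_char_segments_py_alt chapter_nums segment_size gap_threshold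
instance (chapter_nums : List Int) (segment_size : Int) (gap_threshold : Int) (out : List (Int × Int)) : Decidable (Spec_group_char_segments_py chapter_nums segment_size gap_threshold out) := by unfold Spec_group_char_segments_py; infer_instance

-- ===== CLAIM (what is proved, stated in full; the proofs are below) =====
def Claim_equal_group_char_segments_py : Prop := ∀ (chapter_nums : List Int) (segment_size : Int) (gap_threshold : Int), Dom_group_char_segments_py chapter_nums segment_size gap_threshold → Spec_group_char_segments_py chapter_nums segment_size gap_threshold (group_char_segments_py chapter_nums segment_size gap_threshold)

-- ===== LEMMAS AND PROOFS =====

-- B's per-element recursion: close the segment on a gap or window overflow.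
def pvBrec (S G : Int) : Int → Int → List Int → List (Int × Int)
  | f, p, [] => [(f, p)]
  | f, p, x :: xs =>
    if x - p > G ∨ x > f + S - 1 then (f, p) :: pvBrec S G x x xs
    else pvBrec S G f x xs

-- Window-only recursion (what A's step 2 does inside one gap-free group).
def pvWrec (S : Int) : Int → Int → List Int → List (Int × Int)
  | f, p, [] => [(f, p)]
  | f, p, x :: xs =>
    if x > f + S - 1 then (f, p) :: pvWrec S x x xs
    else pvWrec S f x xs

-- Functional form of A's step-1 fold: gap-split into groups.
def pvGsplit (G : Int) : List Int → List Int → List (List Int)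
  | cur, [] => [cur]
  | cur, x :: xs =>
    if x - (cur.getLast?.getD 0) > G then cur :: pvGsplit G [x] xs
    else pvGsplit G (cur ++ [x]) xs

theorem pvBstep_unfold (S G : Int) (st : Int × Int × List (Int × Int)) (x : Int) :
    pvBstep S G st x = if x - st.2.1 > G ∨ x > st.1 + S - 1
      then (x, x, st.2.2 ++ [(st.1, st.2.1)]) else (st.1, x, st.2.2) := rfl

theorem pvBrec_cons (S G f p x : Int) (xs : List Int) :
    pvBrec S G f p (x :: xs) = if x - p > G ∨ x > f + S - 1
      then (f, p) :: pvBrec S G x x xs else pvBrec S G f x xs := rfl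

theorem pvWrec_cons (S f p x : Int) (xs : List Int) :
    pvWrec S f p (x :: xs) = if x > f + S - 1
      then (f, p) :: pvWrec S x x xs else pvWrec S f x xs := rfl

theorem pvGsplit_cons (G x : Int) (cur xs : List Int) :
    pvGsplit G cur (x :: xs) = if x - (cur.getLast?.getD 0) > G
      then cur :: pvGsplit G [x] xs else pvGsplit G (cur ++ [x]) xs := rfl

theorem pvBfold (S G : Int) (xs : List Int) : ∀ (f p : Int) (segs : List (Int × Int)),
    (xs.foldl (pvBstep S G) (f, p, segs)).2.2
      ++ [((xs.foldl (pvBstep S G) (f, p, segs)).1, (xs.foldl (pvBstep S G) (f, p, segs)).2.1)]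
    = segs ++ pvBrec S G f p xs := by
  induction xs with
  | nil => intro f p segs; simp [pvBrec]
  | cons x xs ih =>
    intro f p segs
    rw [List.foldl_cons, pvBstep_unfold, pvBrec_cons]
    by_cases h : x - p > G ∨ x > f + S - 1
    · rw [if_pos h, if_pos h, ih x x (segs ++ [(f, p)]), List.append_assoc]
      rfl
    · rw [if_neg h, if_neg h, ih f x segs]

theorem pvAfold (G : Int) (xs : List Int) : ∀ (gs : List (List Int)) (cur : List Int),
    (xs.foldl (pvAstep G) (gs, cur)).1 ++ [(xs.foldl (pvAstep G) (gs, cur)).2]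
    = gs ++ pvGsplit G cur xs := by
  induction xs with
  | nil => intro gs cur; simp [pvGsplit]
  | cons x xs ih =>
    intro gs cur
    rw [List.foldl_cons, pvGsplit_cons]
    show (xs.foldl (pvAstep G) (pvAstep G (gs, cur) x)).1 ++ _ = _
    rw [show pvAstep G (gs, cur) x = if x - (cur.getLast?.getD 0) > G
        then (gs ++ [cur], [x]) else (gs, cur ++ [x]) from rfl]
    by_cases h : x - (cur.getLast?.getD 0) > G
    · rw [if_pos h, if_pos h, ih (gs ++ [cur]) [x], List.append_assoc]
      rfl
    · rw [if_neg h, if_neg h, ih gs (cur ++ [x])]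

theorem pvFilter_le_eq_takeWhile (c : Int) (u : List Int) (hs : u.Pairwise (· < ·)) :
    u.filter (fun x => decide (x ≤ c)) = u.takeWhile (fun x => decide (x ≤ c)) := by
  induction u with
  | nil => simp
  | cons x xs ih =>
    rcases List.pairwise_cons.mp hs with ⟨h1, h2⟩
    by_cases hx : x ≤ c
    · simp [hx, ih h2]
    · simp only [List.filter_cons, List.takeWhile_cons, decide_eq_false hx]
      simp only [Bool.false_eq_true, if_false]
      refine List.filter_eq_nil_iff.mpr ?_
      intro y hy
      simp only [decide_eq_true_eq]
      intro hyc
      exact hx (le_trans (le_of_lt (h1 y hy)) hyc)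

theorem pvFilter_gt_eq_dropWhile (c : Int) (u : List Int) (hs : u.Pairwise (· < ·)) :
    u.filter (fun x => decide (c < x)) = u.dropWhile (fun x => decide (x ≤ c)) := by
  induction u with
  | nil => simp
  | cons x xs ih =>
    rcases List.pairwise_cons.mp hs with ⟨h1, h2⟩
    by_cases hx : x ≤ c
    · have hncx : ¬ c < x := not_lt.mpr hx
      simp only [List.filter_cons, List.dropWhile_cons, decide_eq_true hx,
        decide_eq_false hncx]
      simpa using ih h2
    · have hcx : c < x := lt_of_not_ge hx
      simp only [List.filter_cons, List.dropWhile_cons, decide_eq_false hx,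
        decide_eq_true hcx]
      simp only [Bool.false_eq_true, if_false, if_true]
      refine congrArg (x :: ·) (List.filter_eq_self.mpr ?_)
      intro y hy
      exact decide_eq_true (lt_trans hcx (h1 y hy))

-- Characterisation of pvWrec: first window = maximal prefix ≤ we, then restart.
theorem pvWchar (S we : Int) (xs : List Int) : ∀ (f p : Int), f + S - 1 = we → p ≤ we →
    pvWrec S f p xs =
      (f, (((p :: xs).takeWhile (fun x => decide (x ≤ we))).getLast?.getD 0)) ::
      (match (p :: xs).dropWhile (fun x => decide (x ≤ we)) with
       | [] => []
       | r :: rs => pvWrec S r r rs) := by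
  induction xs with
  | nil =>
    intro f p _ hp
    simp [pvWrec, hp]
  | cons x xs ih =>
    intro f p hfs hp
    rw [pvWrec_cons, hfs]
    by_cases hx : x > we
    · have hxd : ¬ x ≤ we := not_le.mpr hx
      rw [if_pos hx]
      have ht : (p :: x :: xs).takeWhile (fun x => decide (x ≤ we)) = [p] := by
        rw [List.takeWhile_cons, decide_eq_true hp, if_pos rfl,
          List.takeWhile_cons, decide_eq_false hxd]
        simp
      have hd : (p :: x :: xs).dropWhile (fun x => decide (x ≤ we)) = x :: xs := by
        rw [List.dropWhile_cons, decide_eq_true hp, if_pos rfl,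
          List.dropWhile_cons, decide_eq_false hxd]
        simp
      rw [ht, hd]
      rfl
    · have hxle : x ≤ we := not_lt.mp hx
      rw [if_neg hx, ih f x hfs hxle]
      have ht2 : (x :: xs).takeWhile (fun x => decide (x ≤ we))
          = x :: xs.takeWhile (fun x => decide (x ≤ we)) := by
        rw [List.takeWhile_cons, decide_eq_true hxle, if_pos rfl]
      have ht : (p :: x :: xs).takeWhile (fun x => decide (x ≤ we))
          = p :: x :: xs.takeWhile (fun x => decide (x ≤ we)) := by
        rw [List.takeWhile_cons (l := x :: xs), decide_eq_true hp, if_pos rfl, ht2]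
      have hd : (p :: x :: xs).dropWhile (fun x => decide (x ≤ we))
          = (x :: xs).dropWhile (fun x => decide (x ≤ we)) := by
        rw [List.dropWhile_cons, decide_eq_true hp, if_pos rfl]
      rw [ht, hd, ht2, List.getLast?_cons_cons]

theorem pvWinLoopA_succ (S : Int) (g : List Int) (ws : Int) (fuel : Nat) :
    pvWinLoopA S g ws (fuel + 1) =
      match g.filter (fun n => decide (ws ≤ n ∧ n ≤ ws + S - 1)) with
      | [] => []
      | a :: rest =>
        match g.filter (fun n => decide (ws + S - 1 < n)) with
        | [] => [(a, (a :: rest).getLast (List.cons_ne_nil a rest))]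
        | r :: _ => (a, (a :: rest).getLast (List.cons_ne_nil a rest)) :: pvWinLoopA S g r fuel
      := rfl

theorem pvWinNil (S : Int) (hS : S ≤ 0) (g : List Int) (ws : Int) (n : Nat) :
    pvWinLoopA S g ws (n + 1) = [] := by
  have h : g.filter (fun n => decide (ws ≤ n ∧ n ≤ ws + S - 1)) = [] := by
    refine List.filter_eq_nil_iff.mpr ?_
    intro y _
    simp only [decide_eq_true_eq]
    rintro ⟨h1, h2⟩; omega
  rw [pvWinLoopA_succ, h]

theorem pvWinA (S : Int) : ∀ (fuel : Nat) (g u : List Int) (ws : Int),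
    g.Pairwise (· < ·) → 1 ≤ S →
    u = g.filter (fun n => decide (ws ≤ n)) → u.head? = some ws → u.length < fuel →
    pvWinLoopA S g ws fuel = pvWrec S ws ws u.tail := by
  intro fuel
  induction fuel with
  | zero => intro g u ws _ _ _ _ hlen; omega
  | succ fuel ih =>
    intro g u ws hg hS hu hhead hlen
    have hpu : u.Pairwise (· < ·) := hu ▸ hg.filter _
    have hwe : ws ≤ ws + S - 1 := by omega
    obtain ⟨utl, huc⟩ : ∃ utl, u = ws :: utl := by
      cases u with
      | nil => simp at hhead
      | cons a l =>
        have ha : a = ws := by simpa using hhead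
        exact ⟨l, by rw [ha]⟩
    have hiw : g.filter (fun n => decide (ws ≤ n ∧ n ≤ ws + S - 1))
        = u.takeWhile (fun x => decide (x ≤ ws + S - 1)) := by
      rw [← pvFilter_le_eq_takeWhile _ _ hpu, hu, List.filter_filter]
      refine List.filter_congr ?_
      intro n _
      by_cases h1 : ws ≤ n <;> by_cases h2 : n ≤ ws + S - 1 <;> simp [h1, h2]
    have hrem : g.filter (fun n => decide (ws + S - 1 < n))
        = u.dropWhile (fun x => decide (x ≤ ws + S - 1)) := by
      rw [← pvFilter_gt_eq_dropWhile _ _ hpu, hu, List.filter_filter]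
      refine List.filter_congr ?_
      intro n _
      by_cases h2 : ws + S - 1 < n
      · have h1 : ws ≤ n := by omega
        simp [h1, h2]
      · simp [h2]
    have htw : u.takeWhile (fun x => decide (x ≤ ws + S - 1))
        = ws :: utl.takeWhile (fun x => decide (x ≤ ws + S - 1)) := by
      rw [huc, List.takeWhile_cons, decide_eq_true hwe, if_pos rfl]
    have hdw : u.dropWhile (fun x => decide (x ≤ ws + S - 1))
        = utl.dropWhile (fun x => decide (x ≤ ws + S - 1)) := by
      rw [huc, List.dropWhile_cons, decide_eq_true hwe, if_pos rfl]
    have hutl : u.tail = utl := by rw [huc, List.tail_cons]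
    have hglast : ((ws :: utl).takeWhile (fun x => decide (x ≤ ws + S - 1))).getLast?.getD 0
        = (ws :: utl.takeWhile (fun x => decide (x ≤ ws + S - 1))).getLast (List.cons_ne_nil _ _) := by
      rw [List.takeWhile_cons, decide_eq_true hwe, if_pos rfl,
        List.getLast?_eq_getLast_of_ne_nil (List.cons_ne_nil _ _), Option.getD_some]
    rw [pvWinLoopA_succ, hiw, htw, hutl, pvWchar S (ws + S - 1) utl ws ws rfl hwe]
    rcases hR : utl.dropWhile (fun x => decide (x ≤ ws + S - 1)) with _ | ⟨r, rs⟩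
    · -- no remaining: single segment
      have hdwu : (ws :: utl).dropWhile (fun x => decide (x ≤ ws + S - 1)) = [] := by
        rw [List.dropWhile_cons, decide_eq_true hwe, if_pos rfl, hR]
      rw [hrem, hdw, hR, hdwu, hglast]
    · -- remaining r :: rs : recurse
      have hdwu : (ws :: utl).dropWhile (fun x => decide (x ≤ ws + S - 1)) = r :: rs := by
        rw [List.dropWhile_cons, decide_eq_true hwe, if_pos rfl, hR]
      have hrgt : ws + S - 1 < r := by
        have h0 := List.head?_dropWhile_not (fun x => decide (x ≤ ws + S - 1)) utl
        rw [hR] at h0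
        simp only [List.head?_cons, Option.mem_def, decide_eq_false_iff_not,
          forall_eq'] at h0
        omega
      have hremsort : (u.dropWhile (fun x => decide (x ≤ ws + S - 1))).Pairwise (· < ·) := by
        rw [← hrem]; exact hg.filter _
      rw [hdw, hR] at hremsort
      have hrmem : ∀ n ∈ g, (decide (ws + S - 1 < n)) = (decide (r ≤ n)) := by
        intro n hn
        by_cases h2 : ws + S - 1 < n
        · have hnrem : n ∈ r :: rs := by
            rw [← hR, ← hdw, ← hrem]
            exact List.mem_filter.mpr ⟨hn, by simpa using h2⟩
          have hple : r ≤ n := by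
            rcases List.mem_cons.mp hnrem with h | h
            · omega
            · exact le_of_lt ((List.pairwise_cons.mp hremsort).1 n h)
          simp [hple, h2]
        · have : ¬ r ≤ n := by omega
          simp [this, h2]
      have hnext : pvWinLoopA S g r fuel = pvWrec S r r rs := by
        refine ih g (r :: rs) r hg hS ?_ (by simp) ?_
        · rw [← hR, ← hdw, ← hrem]
          exact List.filter_congr hrmem
        · have hsplit : u.length = (u.takeWhile (fun x => decide (x ≤ ws + S - 1))).length
              + (u.dropWhile (fun x => decide (x ≤ ws + S - 1))).length := by
            conv_lhs => rw [← List.takeWhile_append_dropWhile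
              (p := fun x => decide (x ≤ ws + S - 1)) (l := u)]
            rw [List.length_append]
          rw [htw, hdw, hR] at hsplit
          simp only [List.length_cons] at hsplit hlen ⊢
          omega
      rw [hrem, hdw, hR, hdwu, hglast]
      show _ :: pvWinLoopA S g r fuel = _ :: pvWrec S r r rs
      rw [hnext]

theorem pvBrec_eq_wrec (S G : Int) (xs : List Int) : ∀ (f p : Int),
    List.IsChain (fun a b => b - a ≤ G) (p :: xs) →
    pvBrec S G f p xs = pvWrec S f p xs := by
  induction xs with
  | nil => intro f p _; rfl
  | cons x xs ih =>
    intro f p hc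
    rcases List.isChain_cons.mp hc with ⟨hgap, hc'⟩
    have hg : x - p ≤ G := hgap x rfl
    rw [pvBrec_cons, pvWrec_cons]
    by_cases hx : x > f + S - 1
    · rw [if_pos (Or.inr hx), if_pos hx]
      exact congrArg _ (ih x x hc')
    · have hcond : ¬ (x - p > G ∨ x > f + S - 1) := by omega
      rw [if_neg hcond, if_neg hx]
      exact ih f x hc'

theorem pvBrec_split (S G : Int) (ys : List Int) : ∀ (f p x : Int) (zs : List Int),
    List.IsChain (fun a b => b - a ≤ G) (p :: ys) →
    x - ((p :: ys).getLast?.getD 0) > G →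
    pvBrec S G f p (ys ++ x :: zs) = pvWrec S f p ys ++ pvBrec S G x x zs := by
  induction ys with
  | nil =>
    intro f p x zs _ hx
    simp only [List.getLast?_singleton, Option.getD_some] at hx
    rw [List.nil_append, pvBrec_cons, if_pos (Or.inl hx)]
    rfl
  | cons y ys ih =>
    intro f p x zs hc hx
    rcases List.isChain_cons.mp hc with ⟨hgap, hc'⟩
    have hg : y - p ≤ G := hgap y rfl
    rw [List.getLast?_cons_cons] at hx
    rw [List.cons_append, pvBrec_cons, pvWrec_cons]
    by_cases hy : y > f + S - 1
    · rw [if_pos (Or.inr hy), if_pos hy, ih y y x zs hc' hx]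
      rfl
    · have hcond : ¬ (y - p > G ∨ y > f + S - 1) := by omega
      rw [if_neg hcond, if_neg hy]
      exact ih f y x zs hc' hx

theorem pvMainJ (S G : Int) (hS : 1 ≤ S) (xs : List Int) : ∀ (cur : List Int),
    cur ≠ [] → List.IsChain (fun a b => b - a ≤ G) cur → (cur ++ xs).Pairwise (· < ·) →
    (pvGsplit G cur xs).flatMap (fun g => pvWinLoopA S g (g.head?.getD 0) (g.length + 1))
      = pvBrec S G (cur.head?.getD 0) (cur.head?.getD 0) (cur.tail ++ xs) := by
  induction xs with
  | nil =>
    intro cur hne hchain hpw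
    obtain ⟨a, t, rfl⟩ : ∃ a t, cur = a :: t := by
      cases cur with
      | nil => exact absurd rfl hne
      | cons a t => exact ⟨a, t, rfl⟩
    simp only [pvGsplit, List.flatMap_cons, List.flatMap_nil, List.append_nil,
      List.head?_cons, Option.getD_some, List.tail_cons]
    rw [List.append_nil] at hpw
    have hW : pvWinLoopA S (a :: t) a ((a :: t).length + 1) = pvWrec S a a t := by
      refine pvWinA S ((a :: t).length + 1) (a :: t) (a :: t) a hpw hS ?_ (by simp) (by simp)
      symm
      refine List.filter_eq_self.mpr ?_
      intro y hy
      rcases List.mem_cons.mp hy with h | h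
      · simp [h]
      · exact decide_eq_true (le_of_lt ((List.pairwise_cons.mp hpw).1 y h))
    rw [hW, pvBrec_eq_wrec S G t a a hchain]
  | cons x xs ih =>
    intro cur hne hchain hpw
    obtain ⟨a, t, rfl⟩ : ∃ a t, cur = a :: t := by
      cases cur with
      | nil => exact absurd rfl hne
      | cons a t => exact ⟨a, t, rfl⟩
    rw [pvGsplit_cons]
    by_cases hc : x - ((a :: t).getLast?.getD 0) > G
    · rw [if_pos hc]
      rw [List.flatMap_cons]
      have hpw2 : ([x] ++ xs).Pairwise (· < ·) := by
        refine List.Pairwise.sublist ?_ hpw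
        simpa using List.sublist_append_right (a :: t) (x :: xs)
      have hrest := ih [x] (by simp) (by simp) hpw2
      simp only [List.head?_cons, Option.getD_some, List.tail_cons, List.nil_append] at hrest
      rw [hrest]
      have hpwcur : (a :: t).Pairwise (· < ·) :=
        List.Pairwise.sublist (List.sublist_append_left (a :: t) (x :: xs)) hpw
      have hW : pvWinLoopA S (a :: t) a ((a :: t).length + 1) = pvWrec S a a t := by
        refine pvWinA S ((a :: t).length + 1) (a :: t) (a :: t) a hpwcur hS ?_ (by simp) (by simp)
        symm
        refine List.filter_eq_self.mpr ?_
        intro y hy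
        rcases List.mem_cons.mp hy with h | h
        · simp [h]
        · exact decide_eq_true (le_of_lt ((List.pairwise_cons.mp hpwcur).1 y h))
      simp only [List.head?_cons, Option.getD_some, List.tail_cons]
      rw [hW, pvBrec_split S G t a a x xs hchain hc]
    · rw [if_neg hc]
      have hlast : ∃ l, (a :: t).getLast? = some l := ⟨(a :: t).getLast (by simp),
        List.getLast?_eq_getLast_of_ne_nil (by simp)⟩
      obtain ⟨l, hl⟩ := hlast
      have hchain2 : List.IsChain (fun a b => b - a ≤ G) ((a :: t) ++ [x]) := by
        rw [List.isChain_append]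
        refine ⟨hchain, by simp, ?_⟩
        intro l' hl' y hy
        simp only [List.head?_cons, Option.mem_def, Option.some.injEq] at hy
        subst hy
        rw [Option.mem_def, hl] at hl'
        have : l = l' := by injection hl'
        subst this
        rw [hl] at hc
        simp only [Option.getD_some] at hc
        omega
      have hpw2 : (((a :: t) ++ [x]) ++ xs).Pairwise (· < ·) := by
        simpa [List.append_assoc] using hpw
      have := ih ((a :: t) ++ [x]) (by simp) hchain2 hpw2
      simp only [List.cons_append, List.head?_cons, Option.getD_some, List.tail_cons] at this ⊢
      rw [this]
      simp [List.append_assoc]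

-- ===== VERDICT (by name: the statement is the Claim_ definition above) =====
theorem group_char_segments_py_spec : Claim_equal_group_char_segments_py := by
  intro cs S G _
  unfold Spec_group_char_segments_py
  unfold group_char_segments_py group_char_segments_py_alt
  by_cases hcs : cs = []
  · simp [hcs]
  · have hLpw : (PySem.List.sorted (PySem.Set.ofList cs) (fun x => x) false).Pairwise (· < ·) :=
      PySem.List.sorted_ofList_pairwise_lt cs
    have hLne : PySem.List.sorted (PySem.Set.ofList cs) (fun x => x) false ≠ [] := by
      intro h
      rw [PySem.List.sorted_eq_nil_iff] at h
      cases cs with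
      | nil => exact hcs rfl
      | cons c cs' =>
        have hmem : c ∈ PySem.Set.ofList (c :: cs') :=
          (PySem.Set.mem_ofList _ _).mpr List.mem_cons_self
        rw [h] at hmem
        simp at hmem
    obtain ⟨h, t, hL⟩ : ∃ h t, PySem.List.sorted (PySem.Set.ofList cs) (fun x => x) false = h :: t := by
      cases hE : PySem.List.sorted (PySem.Set.ofList cs) (fun x => x) false with
      | nil => exact absurd hE hLne
      | cons a l => exact ⟨a, l, rfl⟩
    rw [hL] at hLpw
    have hget : PySem.List.pyGetD (h :: t) 0 0 = h := by
      simp [pysem]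
    have hsl : PySem.List.slice (h :: t) (some 1) none = t := by
      rw [PySem.List.slice_from_one, List.tail_cons]
    rw [if_neg hcs]
    dsimp only
    rw [hL, hget, hsl]
    by_cases hS : S ≤ 0
    · rw [if_pos (Or.inr hS)]
      rw [show (pvAouter S) = (fun segs g =>
          segs ++ pvWinLoopA S g (g.head?.getD 0) (g.length + 1)) from rfl]
      rw [PySem.List.foldl_append_eq_flatMap]
      rw [List.flatMap_eq_nil_iff.mpr (fun g _ => pvWinNil S hS g _ _)]
      rfl
    · rw [if_neg (by push Not; exact ⟨hcs, by omega⟩)]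
      have hSpos : 1 ≤ S := by omega
      rw [pvBfold S G t h h []]
      rw [show (pvAouter S) = (fun segs g =>
          segs ++ pvWinLoopA S g (g.head?.getD 0) (g.length + 1)) from rfl]
      rw [PySem.List.foldl_append_eq_flatMap]
      rw [pvAfold G t ([] : List (List Int)) [h]]
      simp only [List.nil_append]
      have hmain := pvMainJ S G hSpos t [h] (by simp) (by simp) (by simpa using hLpw)
      simp only [List.head?_cons, Option.getD_some, List.tail_cons, List.nil_append] at hmain
      rw [hmain]
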